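-- pv_equiv track=rewrite | github.com/MkAngelo/LeetCode | P1A.py | alphanumeric
-- ===== SOURCE A (Python) =====
-- import string
--
-- def alphanumeric(password):
--     num = ["0","1","2","3","4","5","6","7","8","9"]
--     abc = list(string.ascii_lowercase)
--     aBC = list(string.ascii_uppercase)
--     alpnum = num + abc + aBC
--     for l in password:
--         if l not in alpnum:
--             return False
--     return True
-- ===== SOURCE B (Python) =====
-- import string
--
-- def alphanumeric(password):
--     # Delete every allowed character in one translate pass; valid iff nothing remains.
--     return password.translate(str.maketrans('', '', string.ascii_letters + string.digits)) == ''
-- ===== Notes on version B (the rewrite author's own statement) =====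
-- stated objective: faster
-- what changed: Replaces the per-character early-return loop over a 62-element membership list with a single str.translate that deletes all allowed characters and tests whether the residual string is empty.
import Mathlib
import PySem

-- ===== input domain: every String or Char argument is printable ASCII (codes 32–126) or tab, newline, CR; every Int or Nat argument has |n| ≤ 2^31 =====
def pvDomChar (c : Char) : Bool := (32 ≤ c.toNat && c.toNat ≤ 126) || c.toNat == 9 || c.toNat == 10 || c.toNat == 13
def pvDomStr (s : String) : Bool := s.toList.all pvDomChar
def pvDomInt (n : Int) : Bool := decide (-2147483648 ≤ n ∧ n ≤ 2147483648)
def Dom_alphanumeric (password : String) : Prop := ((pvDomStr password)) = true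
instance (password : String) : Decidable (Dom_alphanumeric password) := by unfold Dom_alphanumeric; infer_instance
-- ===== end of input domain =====

-- B deletes every allowed character with one translate pass and tests the residue
-- for emptiness instead of A's per-character early-return membership loop (faster).


-- ===== PORT A =====
-- for l in password: if l not in alpnum: return False / return True
def alphanumericLoop (alpnum : List Char) : List Char → Bool
  | [] => true
  | l :: rest => if ¬ (alpnum.contains l) then false else alphanumericLoop alpnum rest

def alphanumeric (password : String) : Bool :=
  let num : List Char := ['0','1','2','3','4','5','6','7','8','9']
  let abc : List Char := "abcdefghijklmnopqrstuvwxyz".toList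
  let aBC : List Char := "ABCDEFGHIJKLMNOPQRSTUVWXYZ".toList
  let alpnum := num ++ abc ++ aBC
  alphanumericLoop alpnum password.toList

-- ===== PORT B =====
-- password.translate(str.maketrans('', '', letters+digits)) == '':
-- translate with a pure deletion table keeps exactly the chars not in the table,
-- so it is the filter below; '== ""' is the emptiness test of the residue.
def alphanumeric_alt (password : String) : Bool :=
  let delTable : List Char :=
    ("abcdefghijklmnopqrstuvwxyzABCDEFGHIJKLMNOPQRSTUVWXYZ" ++ "0123456789").toList
  decide ((password.toList.filter (fun c => !(delTable.contains c))) = [])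

-- ===== PRECONDITION & SPEC =====
def Spec_alphanumeric (password : String) (out : Bool) : Prop := out = alphanumeric_alt password
instance (password : String) (out : Bool) : Decidable (Spec_alphanumeric password out) := by unfold Spec_alphanumeric; infer_instance

-- ===== CLAIM (what is proved, stated in full; the proofs are below) =====
def Claim_equal_alphanumeric : Prop := ∀ (password : String), Dom_alphanumeric password → Spec_alphanumeric password (alphanumeric password)

-- ===== LEMMAS AND PROOFS =====

def pvAllowed : List Char :=
  ['0','1','2','3','4','5','6','7','8','9'] ++
  "abcdefghijklmnopqrstuvwxyz".toList ++ "ABCDEFGHIJKLMNOPQRSTUVWXYZ".toList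

def pvDel : List Char :=
  ("abcdefghijklmnopqrstuvwxyzABCDEFGHIJKLMNOPQRSTUVWXYZ" ++ "0123456789").toList

set_option maxRecDepth 8192 in
lemma pvChar_key : ∀ n < 127, pvAllowed.contains (Char.ofNat n) = pvDel.contains (Char.ofNat n) := by decide

lemma pvChar_eq (c : Char) (h : pvDomChar c = true) :
    pvAllowed.contains c = pvDel.contains c := by
  have hle : c.toNat < 127 := by
    simp [pvDomChar] at h
    omega
  have := pvChar_key c.toNat hle
  rwa [Char.ofNat_toNat] at this

lemma pvLoop_eq (cs : List Char) (h : cs.all pvDomChar = true) :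
    alphanumericLoop pvAllowed cs = decide ((cs.filter (fun c => !(pvDel.contains c))) = []) := by
  induction cs with
  | nil => rfl
  | cons c rest ih =>
    simp only [List.all_cons, Bool.and_eq_true] at h
    simp only [alphanumericLoop, List.filter_cons, pvChar_eq c h.1, ih h.2]
    cases pvDel.contains c <;> simp

-- ===== VERDICT (by name: the statement is the Claim_ definition above) =====
theorem alphanumeric_spec : Claim_equal_alphanumeric := by
  intro password hdom
  unfold Spec_alphanumeric alphanumeric alphanumeric_alt
  exact pvLoop_eq password.toList hdom
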